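-- pv_equiv track=rewrite | github.com/ahmed-2001M/LeetCode | Ishaan Loves Chocolates - GFG/ishaan-loves-chocolates.py | chocolates
-- ===== SOURCE A (Python) =====
-- from typing import List
--
-- def chocolates(n : int, arr : List[int]) -> int:
--     # code here
--     n = len(arr)
--     l = 0
--     r = n-1
--     while l < r:
--         if arr[l] < arr[r]:
--             r-=1
--         else:
--             l+=1
--     return arr[r]
-- ===== SOURCE B (Python) =====
-- from typing import List
--
-- def chocolates(n : int, arr : List[int]) -> int:
--     m = arr[0]  # IndexError on empty list, like A's arr[-1]
--     for x in arr[1:]: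
--         if x < m:
--             m = x
--     return m
-- ===== Notes on version B (the rewrite author's own statement) =====
-- stated objective: simpler
-- what changed: A's converging two-pointer elimination always discards the larger endpoint, so it computes the minimum; B replaces it with a direct one-pass running-minimum scan (fewer index operations per step).
import Mathlib
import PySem

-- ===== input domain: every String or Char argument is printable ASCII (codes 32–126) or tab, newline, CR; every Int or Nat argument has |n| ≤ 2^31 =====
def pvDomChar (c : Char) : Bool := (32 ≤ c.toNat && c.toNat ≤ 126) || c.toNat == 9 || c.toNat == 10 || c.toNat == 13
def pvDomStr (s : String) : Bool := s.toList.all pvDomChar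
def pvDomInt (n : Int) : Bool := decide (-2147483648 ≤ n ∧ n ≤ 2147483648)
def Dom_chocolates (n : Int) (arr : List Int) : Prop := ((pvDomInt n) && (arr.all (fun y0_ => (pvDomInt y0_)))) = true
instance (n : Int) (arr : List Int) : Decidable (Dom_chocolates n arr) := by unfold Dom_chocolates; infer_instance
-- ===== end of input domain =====

-- B replaces A's converging two-pointer elimination by a single running-minimum scan (simpler, same O(n) cost).
-- Both Pythons raise IndexError on the empty list; Pre_ excludes exactly that input.

-- ===== PORT A =====
-- Two-pointer loop of A. Under Pre_ (arr ≠ []) the Python indices l, r stay in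
-- [0, len-1], so Nat indices and List.getD are exact there.
def chocLoopA (arr : List Int) (l r : Nat) : Nat :=
  if l < r then
    if arr.getD l 0 < arr.getD r 0 then chocLoopA arr l (r - 1)
    else chocLoopA arr (l + 1) r
  else r
termination_by r - l
decreasing_by all_goals omega

def chocolates (n : Int) (arr : List Int) : Int :=
  -- n = len(arr); l = 0; r = n-1; while l < r: …; return arr[r]
  arr.getD (chocLoopA arr 0 (arr.length - 1)) 0

-- ===== PORT B =====
-- m = arr[0]; for x in arr[1:]: if x < m: m = x; return m
def chocScanB (xs : List Int) (m : Int) : Int :=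
  xs.foldl (fun m x => if x < m then x else m) m

def chocolates_alt (n : Int) (arr : List Int) : Int :=
  match arr with
  | [] => 0        -- unreachable under Pre_ (Python B raises IndexError here, like A)
  | h :: t => chocScanB t h

-- ===== PRECONDITION & SPEC =====
-- Pre_ excludes only the empty list, on which both A and B raise IndexError.
def Pre_chocolates (n : Int) (arr : List Int) : Prop := arr ≠ []
instance (n : Int) (arr : List Int) : Decidable (Pre_chocolates n arr) := by
  unfold Pre_chocolates; infer_instance

def pvWitness_chocolates : Int × List Int := (3, [5, 2, 7])

def Spec_chocolates (n : Int) (arr : List Int) (out : Int) : Prop := out = chocolates_alt n arr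
instance (n : Int) (arr : List Int) (out : Int) : Decidable (Spec_chocolates n arr out) := by unfold Spec_chocolates; infer_instance

-- ===== CLAIM (what is proved, stated in full; the proofs are below) =====
def Claim_equal_chocolates : Prop := ∀ (n : Int) (arr : List Int), Dom_chocolates n arr → Pre_chocolates n arr → Spec_chocolates n arr (chocolates n arr)

-- ===== LEMMAS AND PROOFS =====

-- Minimum of the window arr[l..r], as a recursion peeling the LEFT end.
def wmin (arr : List Int) (l r : Nat) : Int :=
  if l < r then min (arr.getD l 0) (wmin arr (l + 1) r) else arr.getD l 0
termination_by r - l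
decreasing_by omega

lemma wmin_self (arr : List Int) (r : Nat) : wmin arr r r = arr.getD r 0 := by
  rw [wmin]; simp

lemma wmin_le_left (arr : List Int) (l r : Nat) : wmin arr l r ≤ arr.getD l 0 := by
  rw [wmin]; split
  · exact min_le_left _ _
  · exact le_refl _

-- Peeling the RIGHT end of the window.
lemma wmin_pop (arr : List Int) (l r : Nat) (h : l < r) :
    wmin arr l r = min (wmin arr l (r - 1)) (arr.getD r 0) := by
  induction hk : r - l using Nat.strong_induction_on generalizing l with
  | _ k ih =>
    rw [wmin, if_pos h]
    by_cases h2 : l + 1 < r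
    · rw [ih (r - (l + 1)) (by omega) (l + 1) h2 rfl]
      conv_rhs => rw [wmin, if_pos (by omega : l < r - 1)]
      have e : l + 1 = (l + 1) := rfl
      rw [← min_assoc]
    · have : l + 1 = r := by omega
      subst this
      rw [wmin_self]
      conv_rhs => rw [show l + 1 - 1 = l from by omega, wmin, if_neg (by omega)]

lemma wmin_le_right (arr : List Int) (l r : Nat) (h : l ≤ r) :
    wmin arr l r ≤ arr.getD r 0 := by
  rcases Nat.lt_or_ge l r with h1 | h1
  · rw [wmin_pop arr l r h1]; exact min_le_right _ _
  · have : l = r := by omega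
    subst this; rw [wmin_self]

-- A's loop computes the window minimum.
lemma chocLoopA_eq (arr : List Int) (l r : Nat) (h : l ≤ r) :
    arr.getD (chocLoopA arr l r) 0 = wmin arr l r := by
  induction hk : r - l using Nat.strong_induction_on generalizing l r with
  | _ k ih =>
    rw [chocLoopA]
    rcases Nat.lt_or_ge l r with h1 | h1
    · rw [if_pos h1]
      split
      case isTrue hlt =>
        rw [ih (r - 1 - l) (by omega) l (r - 1) (by omega) rfl]
        rw [wmin_pop arr l r h1]
        have hle : wmin arr l (r - 1) ≤ arr.getD l 0 := wmin_le_left arr l (r - 1)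
        have : wmin arr l (r - 1) ≤ arr.getD r 0 := le_of_lt (lt_of_le_of_lt hle hlt)
        omega
      case isFalse hge =>
        rw [ih (r - (l + 1)) (by omega) (l + 1) r (by omega) rfl]
        conv_rhs => rw [wmin, if_pos h1]
        have hle : wmin arr (l + 1) r ≤ arr.getD r 0 := wmin_le_right arr (l + 1) r (by omega)
        have : wmin arr (l + 1) r ≤ arr.getD l 0 := by omega
        omega
    · rw [if_neg (by omega), show l = r from by omega, wmin_self]

-- B's step function is `min`.
lemma chocStep_eq_min : (fun (m x : Int) => if x < m then x else m) = fun m x => min m x := by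
  funext m x
  rcases lt_or_ge x m with h | h
  · simp [h, min_eq_right (le_of_lt h)]
  · simp [not_lt.mpr h, min_eq_left h]

lemma foldl_min_pull (xs : List Int) (a b : Int) :
    xs.foldl min (min a b) = min a (xs.foldl min b) := by
  induction xs generalizing b with
  | nil => simp
  | cons x xs ih => simp [List.foldl, min_assoc, ih]

-- wmin over the whole tail is B's fold.
lemma wmin_scan (arr : List Int) (l : Nat) (h : l < arr.length) :
    wmin arr l (arr.length - 1) = (arr.drop (l + 1)).foldl min (arr.getD l 0) := by
  induction hk : arr.length - 1 - l using Nat.strong_induction_on generalizing l with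
  | _ k ih =>
    rcases Nat.lt_or_ge l (arr.length - 1) with h1 | h1
    · rw [wmin, if_pos h1, ih (arr.length - 1 - (l + 1)) (by omega) (l + 1) (by omega) rfl]
      rw [List.drop_eq_getElem_cons (by omega : l + 1 < arr.length)]
      rw [List.foldl_cons]
      rw [show arr[l + 1] = arr.getD (l + 1) 0 from (List.getD_eq_getElem arr 0 (by omega)).symm]
      exact (foldl_min_pull _ _ _).symm
    · have : l = arr.length - 1 := by omega
      subst this
      rw [wmin_self, show arr.length - 1 + 1 = arr.length from by omega, List.drop_length,
        List.foldl_nil]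

-- ===== VERDICT (by name: the statement is the Claim_ definition above) =====
theorem chocolates_spec : Claim_equal_chocolates := by
  intro n arr _ hpre
  unfold Spec_chocolates
  match arr, hpre with
  | h :: t, _ =>
    show List.getD (h :: t) (chocLoopA (h :: t) 0 ((h :: t).length - 1)) 0 = chocScanB t h
    rw [chocLoopA_eq (h :: t) 0 ((h :: t).length - 1) (by omega)]
    rw [wmin_scan (h :: t) 0 (by simp)]
    simp only [List.drop_succ_cons, List.drop_zero, List.getD_cons_zero]
    rw [chocScanB, chocStep_eq_min]
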